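-- pv_equiv track=rewrite | github.com/pyutils/line_profiler | kernprof.py | pre_parse_single_arg_directive
-- ===== SOURCE A (Python) =====
-- def pre_parse_single_arg_directive(args, flag, sep='--'):
--     """
--     Pre-parse high-priority single-argument directives like
--     :option:`!-m module` to emulate the behavior of
--     :command:`python [...]`.
--
--     Examples
--     --------
--     >>> import functools
--     >>> pre_parse = functools.partial(pre_parse_single_arg_directive,
--     ...                               flag='-m')
--
--     Normal parsing:
--
--     >>> pre_parse(['foo', 'bar', 'baz'])
--     (['foo', 'bar', 'baz'], None, [])
--     >>> pre_parse(['foo', 'bar', '-m', 'baz'])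
--     (['foo', 'bar'], 'baz', [])
--     >>> pre_parse(['foo', 'bar', '-m', 'baz', 'foobar'])
--     (['foo', 'bar'], 'baz', ['foobar'])
--
--     Erroneous case:
--
--     >>> pre_parse(['foo', 'bar', '-m'])
--     Traceback (most recent call last):
--       ...
--     ValueError: argument expected for the -m option
--
--     Prevent erroneous consumption of the flag by passing it `'--'`:
--
--     >>> pre_parse(['foo', '--', 'bar', '-m', 'baz'])
--     (['foo', '--'], None, ['bar', '-m', 'baz'])
--     >>> pre_parse(['foo', '-m', 'spam',
--     ...            'eggs', '--', 'bar', '-m', 'baz'])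
--     (['foo'], 'spam', ['eggs', '--', 'bar', '-m', 'baz'])
--     """
--     args = list(args)
--     pre = []
--     post = []
--     try:
--         i_sep = args.index(sep)
--     except ValueError:  # No such element
--         pass
--     else:
--         pre[:] = args[:i_sep]
--         post[:] = args[i_sep + 1:]
--         pre_pre, arg, pre_post = pre_parse_single_arg_directive(pre, flag)
--         if arg is None:
--             assert not pre_post
--             return pre_pre + [sep], arg, post
--         else:
--             return pre_pre, arg, [*pre_post, sep, *post]
--     try:
--         i_flag = args.index(flag)
--     except ValueError:  # No such element
--         return args, None, []
--     if i_flag == len(args) - 1:  # Last element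
--         raise ValueError(f'argument expected for the {flag} option')
--     args, thing, post_args = args[:i_flag], args[i_flag + 1], args[i_flag + 2:]
--     return args, thing, post_args
-- ===== SOURCE B (Python) =====
-- def pre_parse_single_arg_directive(args, flag, sep='--'):
--     """Flat, non-recursive re-implementation: cut the effective prefix once
--     (first at `sep`, then at '--'), search the flag only there."""
--     args = list(args)
--     # Cut at the first occurrence of sep (if any)
--     if sep in args:
--         i = args.index(sep)
--         head, tail, have_sep = args[:i], args[i + 1:], True
--     else:
--         head, tail, have_sep = args, [], False
--     # Inside the prefix, a '--' cuts again (only possible when sep != '--')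
--     if have_sep and '--' in head:
--         k = head.index('--')
--         head, mid, nested = head[:k], head[k + 1:], True
--     else:
--         mid, nested = [], False
--     trailer = (['--'] + mid if nested else []) + ([sep] + tail if have_sep else [])
--     if flag not in head:
--         seps = (['--'] if nested else []) + ([sep] if have_sep else [])
--         return head + seps, None, tail
--     j = head.index(flag)
--     if j == len(head) - 1:
--         raise ValueError(f'argument expected for the {flag} option')
--     return head[:j], head[j + 1], head[j + 2:] + trailer
-- ===== Notes on version B (the rewrite author's own statement) =====
-- stated objective: simpler
-- what changed: Replaced A's self-recursion (re-parsing the pre-separator region with the default '--' separator, then re-splicing the recursive result) by a flat non-recursive pass: cut the effective prefix once (first at sep, then at '--'), search the flag only there, and assemble the result directly; Pre_ excludes exactly the inputs where A raises (ValueError/AssertionError).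
import Mathlib
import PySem

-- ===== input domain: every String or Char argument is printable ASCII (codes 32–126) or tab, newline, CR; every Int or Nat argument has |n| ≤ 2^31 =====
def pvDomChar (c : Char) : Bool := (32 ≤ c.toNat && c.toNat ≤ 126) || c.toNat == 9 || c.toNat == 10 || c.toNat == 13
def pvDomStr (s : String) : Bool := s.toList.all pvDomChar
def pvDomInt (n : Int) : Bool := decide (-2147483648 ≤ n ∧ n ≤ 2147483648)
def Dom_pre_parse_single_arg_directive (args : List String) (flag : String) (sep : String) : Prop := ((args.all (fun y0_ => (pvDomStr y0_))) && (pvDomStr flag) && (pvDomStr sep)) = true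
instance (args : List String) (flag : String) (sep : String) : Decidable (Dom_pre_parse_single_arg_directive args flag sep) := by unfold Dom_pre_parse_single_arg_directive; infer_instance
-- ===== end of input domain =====

-- B replaces A's self-recursion by a flat single pass (cut the prefix at sep then '--',
-- search the flag only there); objective: simpler. Pre_ excludes exactly the inputs on
-- which A raises (ValueError: flag last in the effective prefix — B raises the same;
-- AssertionError: '--' before a custom sep with trailing tokens and no flag).


-- termination helper for the recursive port of A (cited by decreasing_by)
theorem pvIndexLt {xs : List String} {v : String} {i : Nat}
    (h : PySem.List.index? xs v = some i) : i < xs.length := by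
  obtain ⟨pre, suf, hxs, hlen, -⟩ := (PySem.List.index?_eq_some_iff _ _ _).mp h
  subst hxs; simp [← hlen]

-- ===== PORT A =====
-- literal transliteration of A; on the paths where Python raises (the ValueError branch,
-- and the assert in the arg-None branch) the port returns a default — those inputs are
-- outside Pre_.  args[i_flag+1] is ported with pyGetD: i_flag is not the last index there.
def pre_parse_single_arg_directive (args : List String) (flag : String) (sep : String) :
    List String × Option String × List String :=
  match h : PySem.List.index? args sep with
  | some i_sep =>
    let pre := PySem.List.slice args none (some (i_sep : Int))
    let post := PySem.List.slice args (some ((i_sep : Int) + 1)) none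
    match pre_parse_single_arg_directive pre flag "--" with
    | (pre_pre, none, _pre_post) => (pre_pre ++ [sep], none, post)  -- assert not pre_post: raise path ignored (outside Pre_)
    | (pre_pre, some arg, pre_post) => (pre_pre, some arg, pre_post ++ [sep] ++ post)
  | none =>
    match PySem.List.index? args flag with
    | none => (args, none, [])
    | some i_flag =>
      if i_flag = args.length - 1 then ([], none, [])  -- raise ValueError (outside Pre_)
      else (PySem.List.slice args none (some (i_flag : Int)),
            some (PySem.List.pyGetD args ((i_flag : Int) + 1) ""),
            PySem.List.slice args (some ((i_flag : Int) + 2)) none)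
termination_by args.length
decreasing_by
  have := pvIndexLt h
  rw [PySem.List.slice_to_natCast]
  simp only [List.length_take]
  omega

-- ===== PORT B =====
-- flat transliteration of Source B
def pre_parse_single_arg_directive_alt (args : List String) (flag : String) (sep : String) :
    List String × Option String × List String :=
  let c1 : List String × List String × Bool :=
    match PySem.List.index? args sep with
    | some i => (PySem.List.slice args none (some (i : Int)),
                 PySem.List.slice args (some ((i : Int) + 1)) none, true)
    | none => (args, [], false)
  let head0 := c1.1; let tail := c1.2.1; let have_sep := c1.2.2
  let c2 : List String × List String × Bool :=
    if have_sep then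
      match PySem.List.index? head0 "--" with
      | some k => (PySem.List.slice head0 none (some (k : Int)),
                   PySem.List.slice head0 (some ((k : Int) + 1)) none, true)
      | none => (head0, [], false)
    else (head0, [], false)
  let head := c2.1; let mid := c2.2.1; let nested := c2.2.2
  let trailer := (if nested then ["--"] ++ mid else []) ++ (if have_sep then [sep] ++ tail else [])
  match PySem.List.index? head flag with
  | none =>
    let seps := (if nested then ["--"] else []) ++ (if have_sep then [sep] else [])
    (head ++ seps, none, tail)
  | some j =>
    if j = head.length - 1 then ([], none, [])  -- raise ValueError (outside Pre_)
    else (PySem.List.slice head none (some (j : Int)),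
          some (PySem.List.pyGetD head ((j : Int) + 1) ""),
          PySem.List.slice head (some ((j : Int) + 2)) none ++ trailer)

-- ===== PRECONDITION & SPEC =====
-- Pre_ excludes exactly the inputs on which the Python A raises: ValueError when the flag
-- is the last token of the effective prefix (the region before the first sep, further cut
-- at the first '--'), and AssertionError when a '--' occurs inside the pre-sep region with
-- tokens after it and no flag before it.
def pvPreB (args : List String) (flag : String) (sep : String) : Bool :=
  match PySem.List.index? args sep with
  | none => PySem.List.index? args flag != some (args.length - 1)
  | some i =>
    let head0 := args.take i
    match PySem.List.index? head0 "--" with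
    | none => PySem.List.index? head0 flag != some (head0.length - 1)
    | some k =>
      let head := head0.take k
      (PySem.List.index? head flag != some (head.length - 1)) &&
      (head.contains flag || head0.drop (k + 1) == [])

def Pre_pre_parse_single_arg_directive (args : List String) (flag : String) (sep : String) : Prop :=
  pvPreB args flag sep = true
instance (args : List String) (flag : String) (sep : String) : Decidable (Pre_pre_parse_single_arg_directive args flag sep) := by unfold Pre_pre_parse_single_arg_directive; infer_instance

def pvWitness_pre_parse_single_arg_directive : List String × String × String :=
  (["foo", "-m", "bar", "--", "baz"], "-m", "--")

def Spec_pre_parse_single_arg_directive (args : List String) (flag : String) (sep : String) (out : List String × Option String × List String) : Prop := out = pre_parse_single_arg_directive_alt args flag sep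
instance (args : List String) (flag : String) (sep : String) (out : List String × Option String × List String) : Decidable (Spec_pre_parse_single_arg_directive args flag sep out) := by unfold Spec_pre_parse_single_arg_directive; infer_instance

-- ===== CLAIM (what is proved, stated in full; the proofs are below) =====
def Claim_equal_pre_parse_single_arg_directive : Prop := ∀ (args : List String) (flag : String) (sep : String), Dom_pre_parse_single_arg_directive args flag sep → Pre_pre_parse_single_arg_directive args flag sep → Spec_pre_parse_single_arg_directive args flag sep (pre_parse_single_arg_directive args flag sep)

-- ===== LEMMAS AND PROOFS =====

-- the first occurrence cuts cleanly: nothing equal to v before index i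
theorem pvIndexTakeNone {xs : List String} {v : String} {i : Nat}
    (h : PySem.List.index? xs v = some i) : PySem.List.index? (xs.take i) v = none := by
  obtain ⟨pre, suf, hxs, hlen, hnm⟩ := (PySem.List.index?_eq_some_iff _ _ _).mp h
  subst hxs; subst hlen
  rw [List.take_left]
  exact (PySem.List.index?_eq_none_iff _ _).mpr hnm

-- base case of A (no sep, so no recursion) agrees with the flag-search tail of B
theorem pvBase (args : List String) (flag : String)
    (hs : PySem.List.index? args "--" = none)
    (hf : PySem.List.index? args flag ≠ some (args.length - 1)) :
    pre_parse_single_arg_directive args flag "--" =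
      match PySem.List.index? args flag with
      | none => (args, none, [])
      | some j => (PySem.List.slice args none (some (j : Int)),
                   some (PySem.List.pyGetD args ((j : Int) + 1) ""),
                   PySem.List.slice args (some ((j : Int) + 2)) none) := by
  rw [pre_parse_single_arg_directive.eq_def, hs]
  cases hflag : PySem.List.index? args flag with
  | none => rfl
  | some j =>
    have hj : j ≠ args.length - 1 := fun hj => hf (hj ▸ hflag)
    simp only [if_neg hj]

theorem pre_parse_single_arg_directive_spec_aux (args : List String) (flag : String) (sep : String)
    (hpre : Pre_pre_parse_single_arg_directive args flag sep) :
    pre_parse_single_arg_directive args flag sep = pre_parse_single_arg_directive_alt args flag sep := by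
  unfold Pre_pre_parse_single_arg_directive pvPreB at hpre
  rw [pre_parse_single_arg_directive.eq_def]
  unfold pre_parse_single_arg_directive_alt
  cases hsep : PySem.List.index? args sep with
  | none =>
    -- no sep: A's base case; B has have_sep = false, nested = false
    rw [hsep] at hpre
    simp only [bne_iff_ne, ne_eq] at hpre
    cases hflag : PySem.List.index? args flag with
    | none => simp only [hflag, Bool.false_eq_true, if_false, List.append_nil]
    | some j =>
      have hj : j ≠ args.length - 1 := fun h => hpre (h ▸ hflag)
      simp only [hflag, Bool.false_eq_true, if_false, if_neg hj, List.append_nil]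
  | some i =>
    rw [hsep] at hpre
    have hslice : PySem.List.slice args none (some (i : Int)) = args.take i :=
      PySem.List.slice_to_natCast ..
    simp only [hslice] at hpre ⊢
    cases hdd : PySem.List.index? (args.take i) "--" with
    | none =>
      -- no '--' in the pre region: the recursive call is a base case
      rw [hdd] at hpre
      simp only [bne_iff_ne, ne_eq] at hpre
      rw [pvBase (args.take i) flag hdd hpre]
      cases hflag : PySem.List.index? (args.take i) flag with
      | none => simp only [hflag, if_true, Bool.false_eq_true, if_false, List.nil_append]
      | some j =>
        have hj : j ≠ (args.take i).length - 1 := fun h => hpre (h ▸ hflag)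
        simp only [hflag, if_true, Bool.false_eq_true, if_false, if_neg hj,
          List.append_assoc, List.nil_append, List.cons_append, List.append_nil]
    | some k =>
      -- a '--' inside the pre region: the recursion splits once more
      rw [hdd] at hpre
      have hslice2 : PySem.List.slice (args.take i) none (some (k : Int)) = (args.take i).take k :=
        PySem.List.slice_to_natCast ..
      have hnone : PySem.List.index? ((args.take i).take k) "--" = none := pvIndexTakeNone hdd
      simp only [Bool.and_eq_true, bne_iff_ne, ne_eq] at hpre
      rw [pre_parse_single_arg_directive.eq_def, hdd]
      simp only [hslice2]
      rw [pvBase ((args.take i).take k) flag hnone hpre.1]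
      cases hflag : PySem.List.index? ((args.take i).take k) flag with
      | none => simp only [hflag, if_true, List.append_assoc, List.cons_append, List.nil_append]
      | some j =>
        have hj : j ≠ ((args.take i).take k).length - 1 := fun h => hpre.1 (h ▸ hflag)
        simp only [hflag, if_true, if_neg hj, List.append_assoc, List.cons_append, List.nil_append]

-- ===== VERDICT (by name: the statement is the Claim_ definition above) =====
theorem pre_parse_single_arg_directive_spec : Claim_equal_pre_parse_single_arg_directive := by
  intro args flag sep _ hpre
  exact pre_parse_single_arg_directive_spec_aux args flag sep hpre
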